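-- pv_equiv track=rewrite | github.com/Blothen/CA117 | Week03/wordcomps_032.py | most_es
-- ===== SOURCE A (Python) =====
-- def most_es(lines):
--     most_e = 0
--     words = []
--     for item in lines:
--         e_count = [c for c in item if c == "e"]
--         e_num = len(e_count)
--         if e_num > most_e:
--             words = words[:0]
--             words.append(item)
--             most_e = e_num
--         if e_num == most_e and item not in words:
--             words.append(item)
--     return words
-- ===== SOURCE B (Python) =====
-- def most_es(lines):
--     max_e = max((item.count('e') for item in lines), default=0)
--     seen = set()
--     result = []
--     for item in lines:
--         if item.count('e') == max_e and item not in seen: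
--             seen.add(item)
--             result.append(item)
--     return result
-- ===== Notes on version B (the rewrite author's own statement) =====
-- stated objective: simpler
-- what changed: Replaces A's single pass with a running maximum and reset-the-accumulator logic by two plain passes: first compute the maximum 'e'-count, then filter the lines equal to it with an ordered seen-set for deduplication.
import Mathlib
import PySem

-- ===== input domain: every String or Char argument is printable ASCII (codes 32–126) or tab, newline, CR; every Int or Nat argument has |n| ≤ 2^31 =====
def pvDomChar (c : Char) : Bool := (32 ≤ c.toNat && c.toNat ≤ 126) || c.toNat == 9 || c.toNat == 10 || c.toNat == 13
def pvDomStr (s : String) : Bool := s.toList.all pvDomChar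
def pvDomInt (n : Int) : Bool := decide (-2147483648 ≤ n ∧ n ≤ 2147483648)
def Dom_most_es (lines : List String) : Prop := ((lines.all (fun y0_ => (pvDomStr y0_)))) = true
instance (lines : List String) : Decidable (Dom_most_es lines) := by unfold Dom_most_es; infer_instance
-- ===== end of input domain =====

-- B replaces A's running-max-with-reset single pass by two plain passes (scalar max of the
-- 'e'-counts, then a filter with an ordered seen set); same return value, objective: simpler.

-- ===== PORT A =====
-- literal transliteration of A's loop: state = (most_e, words)
def most_es (lines : List String) : List String :=
  (lines.foldl (fun (st : Nat × List String) item =>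
      let e_count := item.toList.filter (fun c => c == 'e')   -- [c for c in item if c == "e"]
      let e_num := e_count.length
      let st' := if e_num > st.1 then (e_num, st.2.take 0 ++ [item]) else st  -- words[:0]; append; most_e
      if e_num = st'.1 ∧ item ∉ st'.2 then (st'.1, st'.2 ++ [item]) else st')
    (0, [])).2

-- ===== PORT B =====
def most_es_alt (lines : List String) : List String :=
  let max_e := PySem.List.maxD (lines.map (fun item => PySem.Str.count item "e")) (fun v => v) 0
  (lines.foldl (fun (st : PySem.Set String × List String) item =>
      if PySem.Str.count item "e" = max_e ∧ ¬ PySem.Set.contains st.1 item then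
        (PySem.Set.add st.1 item, st.2 ++ [item])
      else st)
    (PySem.Set.empty, [])).2

-- ===== PRECONDITION & SPEC =====
def Spec_most_es (lines : List String) (out : List String) : Prop := out = most_es_alt lines
instance (lines : List String) (out : List String) : Decidable (Spec_most_es lines out) := by unfold Spec_most_es; infer_instance

-- ===== CLAIM (what is proved, stated in full; the proofs are below) =====
def Claim_equal_most_es : Prop := ∀ (lines : List String), Dom_most_es lines → Spec_most_es lines (most_es lines)

-- ===== LEMMAS AND PROOFS =====

-- the number of 'e' characters in s (the value both programs count)
def pvCnt (s : String) : Nat := (s.toList.filter (fun c => c == 'e')).length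

-- str.count with a single-character needle is the character count
lemma pvCount_go (l : List Char) : ∀ (fuel acc : Nat), l.length ≤ fuel →
    PySem.Chars.count.go ['e'] fuel l acc = acc + (l.filter (fun c => c == 'e')).length := by
  induction l with
  | nil => intro fuel acc _; cases fuel <;> simp [PySem.Chars.count.go]
  | cons h t ih =>
    intro fuel acc hf
    cases fuel with
    | zero => simp at hf
    | succ f =>
      have ht : t.length ≤ f := by simpa using hf
      by_cases he : h = 'e'
      · subst he
        simp [PySem.Chars.count.go, List.isPrefixOf, ih f (acc + 1) ht, List.filter]
        omega
      · have h1 : ('e' = h) = False := eq_false (fun hh => he hh.symm)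
        simp [PySem.Chars.count.go, List.isPrefixOf, h1, beq_eq_false_iff_ne.mpr he,
          ih f acc ht, List.filter]

lemma pvStrCount (s : String) : PySem.Str.count s "e" = pvCnt s := by
  simp [PySem.Str.count, PySem.Chars.count, pvCnt, -String.length_toList]
  simpa using pvCount_go s.toList s.length 0 (by simp)

-- the running max of 'e'-counts
def pvMax (l : List String) : Nat := l.foldl (fun m i => max m (pvCnt i)) 0

-- the distinct lines with maximal 'e'-count, in first-appearance order
def pvSel (l : List String) : List String :=
  PySem.Set.ofList (l.filter (fun i => pvCnt i = pvMax l))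

lemma pvMax_append (l : List String) (x : String) :
    pvMax (l ++ [x]) = max (pvMax l) (pvCnt x) := by simp [pvMax]

lemma pvCnt_le_max (l : List String) : ∀ i ∈ l, pvCnt i ≤ pvMax l :=
  (PySem.List.le_foldl_max_nat l pvCnt 0).2

-- B's first pass (max(..., default=0)) computes pvMax
lemma pvMaxD_eq (lines : List String) :
    PySem.List.maxD (lines.map pvCnt) (fun v => v) 0 = pvMax lines := by
  cases lines with
  | nil => rfl
  | cons x rest => simp [PySem.List.maxD, PySem.List.max?_id_cons, List.foldl_map, pvMax]

-- A's fold computes (pvMax, pvSel)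
lemma pvA_fold (lines : List String) :
    lines.foldl (fun (st : Nat × List String) item =>
      let e_count := item.toList.filter (fun c => c == 'e')
      let e_num := e_count.length
      let st' := if e_num > st.1 then (e_num, st.2.take 0 ++ [item]) else st
      if e_num = st'.1 ∧ item ∉ st'.2 then (st'.1, st'.2 ++ [item]) else st')
    (0, []) = (pvMax lines, pvSel lines) := by
  induction lines using List.reverseRecOn with
  | nil => simp [pvMax, pvSel]
  | append_singleton l x ih =>
    rw [List.foldl_append, ih]
    simp only [List.foldl_cons, List.foldl_nil]
    have hx : (x.toList.filter (fun c => c == 'e')).length = pvCnt x := rfl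
    by_cases hgt : pvCnt x > pvMax l
    · have hmax : pvMax (l ++ [x]) = pvCnt x := by rw [pvMax_append]; omega
      have hfil : l.filter (fun i => pvCnt i = pvCnt x) = [] := by
        rw [List.filter_eq_nil_iff]
        intro i hi
        have := pvCnt_le_max l i hi
        simp; omega
      have hsel : pvSel (l ++ [x]) = [x] := by
        simp [pvSel, List.filter_append, hmax, hfil, PySem.Set.ofList, PySem.Set.add]
      simp [hx, hgt, hmax, hsel]
    · rw [Nat.not_lt] at hgt
      have hmax : pvMax (l ++ [x]) = pvMax l := by rw [pvMax_append]; omega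
      by_cases heq : pvCnt x = pvMax l
      · have hsel : pvSel (l ++ [x]) = PySem.Set.add (pvSel l) x := by
          simp [pvSel, hmax, List.filter_append, heq, PySem.Set.ofList_append_singleton]
        rw [PySem.Set.add_eq_ite] at hsel
        by_cases hm : x ∈ pvSel l
        · simp [hx, heq, hm, hsel, hmax]
        · simp [hx, heq, hm, hsel, hmax]
      · have hsel : pvSel (l ++ [x]) = pvSel l := by
          simp [pvSel, hmax, List.filter_append, heq]
        simp [hx, hsel, hmax, Nat.not_lt.mpr hgt, heq]

-- B's second pass starting from a state (s, s) appends exactly the new matching lines to both components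
lemma pvB_fold_gen (t : Nat) (lines : List String) : ∀ (s : List String),
    lines.foldl (fun (st : PySem.Set String × List String) item =>
      if pvCnt item = t ∧ item ∉ st.1 then
        (PySem.Set.add st.1 item, st.2 ++ [item])
      else st)
    (s, s) = (PySem.Set.update s (lines.filter (fun i => pvCnt i = t)),
              PySem.Set.update s (lines.filter (fun i => pvCnt i = t))) := by
  induction lines with
  | nil => intro s; simp [PySem.Set.update]
  | cons x rest ih =>
    intro s
    simp only [List.foldl_cons, List.filter_cons]
    by_cases hc : pvCnt x = t
    · by_cases hm : x ∈ s
      · simp [hc, hm, ih s, PySem.Set.update_cons]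
      · simp only [hc, hm, true_and, not_false_iff, if_pos, PySem.Set.add_of_not_mem hm]
        simp [ih (s ++ [x]), PySem.Set.update_cons, PySem.Set.add_of_not_mem hm]
    · simp [hc, ih s]

-- ===== VERDICT (by name: the statement is the Claim_ definition above) =====
theorem most_es_spec : Claim_equal_most_es := by
  intro lines _
  unfold Spec_most_es most_es most_es_alt
  rw [pvA_fold]
  simp only [pvStrCount, pvMaxD_eq]
  simp only [PySem.Set.contains_eq_listContains, List.contains_iff_mem, PySem.Set.empty]
  rw [pvB_fold_gen (pvMax lines) lines []]
  simp [pvSel, PySem.Set.update_nil_left]
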